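-- pv_equiv track=rewrite | github.com/Viraj217/Synapse-task | pikachutask.py | strongest_squads
-- ===== SOURCE A (Python) =====
-- from itertools import combinations
--
-- def strongest_squads(pokedex, k):
--     best_count = -1
--     best = []
--
--     for team in combinations(pokedex.keys(), k):
--         types = set()
--         for name in team:
--             types.update(pokedex[name])
--
--         tcount = len(types)
--         if tcount > best_count:
--             best_count = tcount
--             best = [(team, types)]
--         elif tcount == best_count:
--             best.append((team, types))
--
--     return best_count, best
-- ===== SOURCE B (Python) =====
-- from itertools import combinations
--
-- def strongest_squads(pokedex, k):
--     results = [(team, set().union(*(pokedex[name] for name in team)))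
--                for team in combinations(pokedex.keys(), k)]
--     best_count = max((len(types) for _, types in results), default=-1)
--     return best_count, [(team, types) for team, types in results
--                         if len(types) == best_count]
-- ===== Notes on version B (the rewrite author's own statement) =====
-- stated objective: alternative
-- what changed: Replaces A's single-pass running-max loop with in-place list rebuilding by a materialize-then-select decomposition: build all (team, type-union) pairs once, take the max coverage with default=-1, then filter the winners.
import Mathlib
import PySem

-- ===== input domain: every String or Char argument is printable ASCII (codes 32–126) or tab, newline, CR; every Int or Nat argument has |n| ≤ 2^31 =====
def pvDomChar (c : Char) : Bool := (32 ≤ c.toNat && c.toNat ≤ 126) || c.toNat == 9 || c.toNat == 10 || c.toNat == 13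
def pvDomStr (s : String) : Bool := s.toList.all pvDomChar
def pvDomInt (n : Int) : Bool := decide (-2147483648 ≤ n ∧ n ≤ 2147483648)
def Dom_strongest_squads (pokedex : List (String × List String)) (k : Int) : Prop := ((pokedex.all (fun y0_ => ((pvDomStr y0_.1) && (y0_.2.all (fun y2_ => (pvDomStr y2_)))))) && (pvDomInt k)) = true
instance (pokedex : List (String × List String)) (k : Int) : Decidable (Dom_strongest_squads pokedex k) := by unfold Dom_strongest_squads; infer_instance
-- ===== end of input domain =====

-- B replaces A's running-max accumulator loop with a materialize-then-select decomposition
-- (build all (team, type-union) pairs, take the max, filter the winners); objective: alternative, same cost.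

-- ===== PORT A =====
-- Literal port of A: one fold over combinations(keys, k) maintaining (best_count, best);
-- the inner 'for name in team: types.update(pokedex[name])' is the nested fold.
def strongest_squads (pokedex : List (String × List String)) (k : Int) : Int × (List (List String × List String)) :=
  (PySem.List.combinations (pokedex.map Prod.fst) k.toNat).foldl
    (fun st team =>
      let types : PySem.Set String :=
        team.foldl (fun s name => PySem.Set.update s ((PySem.Dict.mk pokedex).getD name [])) PySem.Set.empty
      let tcount : Int := PySem.Set.len types
      if tcount > st.1 then (tcount, [(team, types)])
      else if tcount = st.1 then (st.1, st.2 ++ [(team, types)])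
      else st)
    (-1, [])

-- ===== PORT B =====
-- Port of B (Source B): materialize results, then max with default -1, then filter.
-- set().union(*(pokedex[name] for name in team)) = the deduplicated concatenation of the looked-up lists.
def strongest_squads_alt (pokedex : List (String × List String)) (k : Int) : Int × (List (List String × List String)) :=
  let results : List (List String × PySem.Set String) :=
    (PySem.List.combinations (pokedex.map Prod.fst) k.toNat).map
      (fun team => (team, PySem.Set.update PySem.Set.empty (team.flatMap (fun name => (PySem.Dict.mk pokedex).getD name []))))
  let best_count : Int :=
    (results.map (fun r => (PySem.Set.len r.2 : Int))).foldl max (-1)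
  (best_count, results.filter (fun r => PySem.Set.len r.2 = best_count))

-- ===== PRECONDITION & SPEC =====
-- Pre_ excludes k < 0, where itertools.combinations raises ValueError.
def Pre_strongest_squads (pokedex : List (String × List String)) (k : Int) : Prop := 0 ≤ k
instance (pokedex : List (String × List String)) (k : Int) : Decidable (Pre_strongest_squads pokedex k) := by unfold Pre_strongest_squads; infer_instance
def pvWitness_strongest_squads : (List (String × List String)) × Int := ([("pika", ["electric"]), ("bulba", ["grass", "poison"])], 1)

def Spec_strongest_squads (pokedex : List (String × List String)) (k : Int) (out : Int × (List (List String × List String))) : Prop := out = strongest_squads_alt pokedex k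
instance (pokedex : List (String × List String)) (k : Int) (out : Int × (List (List String × List String))) : Decidable (Spec_strongest_squads pokedex k out) := by unfold Spec_strongest_squads; infer_instance

-- ===== CLAIM (what is proved, stated in full; the proofs are below) =====
def Claim_equal_strongest_squads : Prop := ∀ (pokedex : List (String × List String)) (k : Int), Dom_strongest_squads pokedex k → Pre_strongest_squads pokedex k → Spec_strongest_squads pokedex k (strongest_squads pokedex k)

-- ===== LEMMAS AND PROOFS =====

-- nested update-fold (A's inner loop) = single update of the flattened lookups (B's union)
theorem types_fold_eq_flat (g : String → List String) (team : List String) (s : PySem.Set String) :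
    team.foldl (fun s name => PySem.Set.update s (g name)) s
      = PySem.Set.update s (team.flatMap g) := by
  induction team generalizing s with
  | nil => simp [PySem.Set.update]
  | cons x t ih => simp [PySem.Set.update, List.foldl_append] at *; simp [ih]

-- running max over the projected lengths
def pvM (rs : List (List String × PySem.Set String)) : Int :=
  (rs.map (fun r => (PySem.Set.len r.2 : Int))).foldl max (-1)

theorem pvM_append (rs : List (List String × PySem.Set String)) (r : List String × PySem.Set String) :
    pvM (rs ++ [r]) = max (pvM rs) (PySem.Set.len r.2) := by
  simp [pvM, List.foldl_append]

theorem le_pvM (rs : List (List String × PySem.Set String)) :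
    -1 ≤ pvM rs ∧ ∀ r ∈ rs, (PySem.Set.len r.2 : Int) ≤ pvM rs := by
  have h := PySem.List.le_foldl_max_int rs (fun r => (PySem.Set.len r.2 : Int)) (-1)
  have he : pvM rs = rs.foldl (fun acc y => max acc ((PySem.Set.len y.2 : Int))) (-1) := by
    simp [pvM, List.foldl_map]
  exact ⟨he ▸ h.1, fun r hr => he ▸ h.2 r hr⟩

-- the heart: A's running-max fold over any materialized list = (max, filter-by-max)
theorem fold_eq_max_filter (rs : List (List String × PySem.Set String)) :
    rs.foldl
      (fun st r =>
        if (PySem.Set.len r.2 : Int) > st.1 then ((PySem.Set.len r.2 : Int), [r])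
        else if (PySem.Set.len r.2 : Int) = st.1 then (st.1, st.2 ++ [r])
        else st)
      (-1, [])
    = (pvM rs, rs.filter (fun r => (PySem.Set.len r.2 : Int) = pvM rs)) := by
  induction rs using List.reverseRecOn with
  | nil => simp [pvM]
  | append_singleton rs r ih =>
    rw [List.foldl_append, List.foldl_cons, List.foldl_nil, ih, pvM_append]
    have hub := (le_pvM rs).2
    rcases lt_trichotomy (pvM rs) ((PySem.Set.len r.2 : Int)) with hgt | heq | hlt
    · have hmax : max (pvM rs) ((PySem.Set.len r.2 : Int)) = (PySem.Set.len r.2 : Int) :=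
        max_eq_right (le_of_lt hgt)
      have hfilt : rs.filter (fun r' => decide ((PySem.Set.len r'.2 : Int) = (PySem.Set.len r.2 : Int))) = [] := by
        rw [List.filter_eq_nil_iff]
        intro r' hr'
        have := hub r' hr'
        simp only [decide_eq_true_eq]
        omega
      rw [if_pos hgt, hmax, List.filter_append, hfilt]
      simp
    · rw [if_neg (by omega), if_pos heq.symm, List.filter_append]
      have hmax : max (pvM rs) ((PySem.Set.len r.2 : Int)) = pvM rs := max_eq_left (le_of_eq heq.symm)
      rw [hmax]
      have hyes : ((List.length r.2 : Int) = pvM rs) := heq.symm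
      simp [hyes]
    · rw [if_neg (by omega), if_neg (by omega), List.filter_append]
      have hmax : max (pvM rs) ((PySem.Set.len r.2 : Int)) = pvM rs := max_eq_left (le_of_lt hlt)
      have hne : ¬ ((PySem.Set.len r.2 : Int) = pvM rs) := by omega
      rw [hmax]
      have hne' : ¬ ((List.length r.2 : Int) = pvM rs) := hne
      simp [hne']


-- ===== VERDICT (by name: the statement is the Claim_ definition above) =====
theorem strongest_squads_spec : Claim_equal_strongest_squads := by
  intro pokedex k _ _
  unfold Spec_strongest_squads strongest_squads strongest_squads_alt
  have hfun : (fun (st : Int × List (List String × List String)) (team : List String) =>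
      let types : PySem.Set String :=
        team.foldl (fun s name => PySem.Set.update s ((PySem.Dict.mk pokedex).getD name [])) PySem.Set.empty
      let tcount : Int := PySem.Set.len types
      if tcount > st.1 then (tcount, [(team, types)])
      else if tcount = st.1 then (st.1, st.2 ++ [(team, types)])
      else st)
    = (fun st team =>
        (fun (st : Int × List (List String × List String)) (r : List String × PySem.Set String) =>
          if (PySem.Set.len r.2 : Int) > st.1 then ((PySem.Set.len r.2 : Int), [r])
          else if (PySem.Set.len r.2 : Int) = st.1 then (st.1, st.2 ++ [r])
          else st) st
        ((fun team => (team, PySem.Set.update PySem.Set.empty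
            (team.flatMap (fun name => (PySem.Dict.mk pokedex).getD name [])))) team)) := by
    funext st team
    simp only [types_fold_eq_flat]
  have hmap := (List.foldl_map
    (f := fun team : List String => (team, PySem.Set.update PySem.Set.empty
        (team.flatMap (fun name => (PySem.Dict.mk pokedex).getD name []))))
    (g := fun (st : Int × List (List String × List String)) (r : List String × PySem.Set String) =>
        if (PySem.Set.len r.2 : Int) > st.1 then ((PySem.Set.len r.2 : Int), [r])
        else if (PySem.Set.len r.2 : Int) = st.1 then (st.1, st.2 ++ [r])
        else st)
    (l := PySem.List.combinations (pokedex.map Prod.fst) k.toNat)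
    (init := ((-1 : Int), ([] : List (List String × List String))))).symm
  rw [hfun, hmap, fold_eq_max_filter]
  simp only [pvM]
  rfl
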